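-- pv_equiv track=rewrite | github.com/MoohShadox/PMTK-CPLEX | PMTK/.ipynb_checkpoints/utils-checkpoint.py | compare_with_utilities
-- ===== SOURCE A (Python) =====
-- def evaluate(v, utility, subsets):
--     c = 0
--     for u,s in zip(utility, subsets):
--         if all(i in v for i in s):
--             c += u
--     return c
--
-- def compare_with_utilities(s_1, s_2, utilities, subsets):
--     k = 0
--     for u in utilities:
--         vs_1 = evaluate(s_1, u, subsets)
--         vs_2 = evaluate(s_2, u, subsets)
--         if vs_1 > vs_2:
--             k += 1
--     return k
-- ===== SOURCE B (Python) =====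
-- def compare_with_utilities(s_1, s_2, utilities, subsets):
--     set1, set2 = set(s_1), set(s_2)
--     delta = [int(all(i in set1 for i in sub)) - int(all(i in set2 for i in sub))
--              for sub in subsets]
--     return sum(1 for u in utilities if sum(c * d for c, d in zip(u, delta)) > 0)
-- ===== Notes on version B (the rewrite author's own statement) =====
-- stated objective: faster
-- what changed: Instead of re-testing every subset's membership in s_1 and s_2 for each utility, B precomputes once a per-subset delta vector (+1/0/-1 from set-based containment tests) and counts utilities whose dot product with delta is positive.
import Mathlib
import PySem

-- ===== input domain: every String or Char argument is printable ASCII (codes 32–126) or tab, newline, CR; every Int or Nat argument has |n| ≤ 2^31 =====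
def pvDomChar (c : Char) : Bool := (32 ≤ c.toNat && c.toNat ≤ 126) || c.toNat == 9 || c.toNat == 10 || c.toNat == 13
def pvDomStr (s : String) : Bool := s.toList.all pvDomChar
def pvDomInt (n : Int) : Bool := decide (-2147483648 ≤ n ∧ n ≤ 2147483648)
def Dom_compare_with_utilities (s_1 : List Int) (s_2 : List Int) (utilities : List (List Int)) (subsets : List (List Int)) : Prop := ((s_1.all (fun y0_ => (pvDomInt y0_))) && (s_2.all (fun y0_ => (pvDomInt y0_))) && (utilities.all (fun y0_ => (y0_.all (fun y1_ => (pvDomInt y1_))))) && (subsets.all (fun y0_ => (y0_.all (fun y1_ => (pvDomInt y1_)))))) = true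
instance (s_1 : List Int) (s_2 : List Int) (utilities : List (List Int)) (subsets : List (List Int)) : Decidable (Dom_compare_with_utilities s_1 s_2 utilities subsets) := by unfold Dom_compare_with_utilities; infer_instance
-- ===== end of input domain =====

-- B precomputes one per-subset delta vector from set-based containment tests and counts
-- utilities with a positive dot product against it, instead of A's per-utility re-evaluation.

-- ===== PORT A =====
-- evaluate(v, utility, subsets)
def pyEvaluate (v : List Int) (utility : List Int) (subsets : List (List Int)) : Int :=
  (List.zip utility subsets).foldl
    (fun c us => if us.2.all (fun i => v.contains i) then c + us.1 else c) 0

def compare_with_utilities (s_1 : List Int) (s_2 : List Int) (utilities : List (List Int)) (subsets : List (List Int)) : Int :=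
  utilities.foldl
    (fun k u => if pyEvaluate s_2 u subsets < pyEvaluate s_1 u subsets then k + 1 else k) 0

-- ===== PORT B =====
-- the delta list comprehension of Source B (set1/set2 are Python sets built once)
def pvDelta (s_1 : List Int) (s_2 : List Int) (subsets : List (List Int)) : List Int :=
  let set1 : PySem.Set Int := PySem.Set.ofList s_1
  let set2 : PySem.Set Int := PySem.Set.ofList s_2
  subsets.map (fun sub =>
    (if sub.all (fun i => PySem.Set.contains set1 i) then (1 : Int) else 0) -
    (if sub.all (fun i => PySem.Set.contains set2 i) then (1 : Int) else 0))

-- sum(c * d for c, d in zip(u, delta))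
def pvDot (u : List Int) (delta : List Int) : Int :=
  (List.zip u delta).foldl (fun acc cd => acc + cd.1 * cd.2) 0

def compare_with_utilities_alt (s_1 : List Int) (s_2 : List Int) (utilities : List (List Int)) (subsets : List (List Int)) : Int :=
  let delta := pvDelta s_1 s_2 subsets
  ((utilities.filter (fun u => decide (0 < pvDot u delta))).length : Int)

-- ===== PRECONDITION & SPEC =====
def Spec_compare_with_utilities (s_1 : List Int) (s_2 : List Int) (utilities : List (List Int)) (subsets : List (List Int)) (out : Int) : Prop := out = compare_with_utilities_alt s_1 s_2 utilities subsets
instance (s_1 : List Int) (s_2 : List Int) (utilities : List (List Int)) (subsets : List (List Int)) (out : Int) : Decidable (Spec_compare_with_utilities s_1 s_2 utilities subsets out) := by unfold Spec_compare_with_utilities; infer_instance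

-- ===== CLAIM (what is proved, stated in full; the proofs are below) =====
def Claim_equal_compare_with_utilities : Prop := ∀ (s_1 : List Int) (s_2 : List Int) (utilities : List (List Int)) (subsets : List (List Int)), Dom_compare_with_utilities s_1 s_2 utilities subsets → Spec_compare_with_utilities s_1 s_2 utilities subsets (compare_with_utilities s_1 s_2 utilities subsets)

-- ===== LEMMAS AND PROOFS =====

-- set membership built by B agrees with A's list membership
theorem pv_set_contains (s : List Int) (i : Int) :
    PySem.Set.contains (PySem.Set.ofList s) i = s.contains i := by
  simp [PySem.Set.contains_eq_listContains, PySem.Set.mem_ofList]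

-- A's evaluate as a sum over the zipped list
theorem pyEvaluate_eq_sum (v : List Int) (u : List Int) (subs : List (List Int)) :
    pyEvaluate v u subs =
      ((List.zip u subs).map
        (fun us => if us.2.all (fun i => v.contains i) then us.1 else 0)).sum := by
  unfold pyEvaluate
  rw [PySem.List.foldl_congr_mem (List.zip u subs)
      (fun c us => if us.2.all (fun i => v.contains i) then c + us.1 else c)
      (fun c us => c + (if us.2.all (fun i => v.contains i) then us.1 else (0:Int)))
      0 (by intro acc x _; dsimp only; split <;> ring)]
  rw [PySem.List.foldl_add]
  ring

-- B's dot product as a sum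
theorem pvDot_eq_sum (u delta : List Int) :
    pvDot u delta = ((List.zip u delta).map (fun cd => cd.1 * cd.2)).sum := by
  unfold pvDot
  rw [PySem.List.foldl_add (List.zip u delta) (fun cd => cd.1 * cd.2) 0]
  ring

-- key: the difference of A's two evaluations is B's dot product with the delta vector
theorem pv_eval_sub_eq_dot (s_1 s_2 : List Int) (u : List Int) (subs : List (List Int)) :
    pyEvaluate s_1 u subs - pyEvaluate s_2 u subs = pvDot u (pvDelta s_1 s_2 subs) := by
  rw [pyEvaluate_eq_sum, pyEvaluate_eq_sum, pvDot_eq_sum]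
  unfold pvDelta
  simp only [pv_set_contains]
  induction u generalizing subs with
  | nil => simp
  | cons c cs ih =>
    cases subs with
    | nil => simp
    | cons sub rest =>
      simp only [List.map_cons, List.zip_cons_cons, List.sum_cons]
      rw [← ih rest]
      split <;> split <;> ring

-- ===== VERDICT (by name: the statement is the Claim_ definition above) =====
theorem compare_with_utilities_spec : Claim_equal_compare_with_utilities := by
  intro s_1 s_2 utilities subsets _
  unfold Spec_compare_with_utilities compare_with_utilities compare_with_utilities_alt
  rw [PySem.List.foldl_ite_add_one]
  rw [List.countP_eq_length_filter]
  norm_num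
  congr 1
  apply List.filter_congr
  intro u _
  have h := pv_eval_sub_eq_dot s_1 s_2 u subsets
  simp only [decide_eq_decide]
  omega
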